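-- pv_equiv track=rewrite | github.com/Charpup/game-localization-mvr | scripts/translate_refresh.py | derive_overall_status
-- ===== SOURCE A (Python) =====
-- from typing import Any, Dict, Iterable, List, Optional, Sequence, Tuple
--
-- def derive_overall_status(tasks: List[Dict[str, Any]], gate_status: str = "passed") -> str:
--     if gate_status == "blocked":
--         return "blocked"
--     if any(str(task.get("final_status") or "") == "blocked" for task in tasks):
--         return "blocked"
--     if any(str(task.get("execution_status") or "") == "failed" for task in tasks):
--         return "failed"
--     if any(str(task.get("final_status") or "") == "review_handoff" for task in tasks):
--         return "review_handoff"
--     if any(str(task.get("final_status") or "") == "updated" for task in tasks):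
--         return "updated"
--     return "pending"
-- ===== SOURCE B (Python) =====
-- from typing import Any, Dict, List
--
-- def derive_overall_status(tasks: List[Dict[str, Any]], gate_status: str = "passed") -> str:
--     blocked_final = failed = review = updated = False
--     for task in tasks:
--         fs = str(task.get("final_status") or "")
--         es = str(task.get("execution_status") or "")
--         blocked_final = blocked_final or fs == "blocked"
--         failed = failed or es == "failed"
--         review = review or fs == "review_handoff"
--         updated = updated or fs == "updated"
--     if gate_status == "blocked" or blocked_final:
--         return "blocked"
--     if failed:
--         return "failed"
--     if review:
--         return "review_handoff"
--     if updated: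
--         return "updated"
--     return "pending"
-- ===== Notes on version B (the rewrite author's own statement) =====
-- stated objective: alternative
-- what changed: Replaced four separate any()-scans over the task list by a single pass that maintains four boolean flags, then applies the priority cascade to the flags; trades A's short-circuiting scans for one full traversal.
import Mathlib
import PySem

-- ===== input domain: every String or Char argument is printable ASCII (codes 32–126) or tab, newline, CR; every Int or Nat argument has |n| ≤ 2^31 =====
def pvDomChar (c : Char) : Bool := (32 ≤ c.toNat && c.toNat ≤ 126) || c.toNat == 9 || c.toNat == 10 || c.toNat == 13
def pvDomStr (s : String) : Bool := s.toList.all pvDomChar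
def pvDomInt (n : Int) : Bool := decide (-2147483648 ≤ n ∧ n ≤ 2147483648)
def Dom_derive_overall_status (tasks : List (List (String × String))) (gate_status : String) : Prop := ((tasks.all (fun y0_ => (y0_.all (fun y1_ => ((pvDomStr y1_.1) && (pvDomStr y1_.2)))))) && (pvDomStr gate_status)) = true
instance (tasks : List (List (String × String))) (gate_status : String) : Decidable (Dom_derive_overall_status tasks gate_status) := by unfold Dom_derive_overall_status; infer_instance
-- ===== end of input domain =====

-- B replaces A's four any()-scans of the task list by a single pass maintaining four boolean flags, then the priority cascade on the flags (alternative decomposition).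

-- ===== PORT A =====
-- str(task.get(k) or "") : missing key -> "", and "" or "" -> "", so = getD with default ""
def pvTaskGet (t : List (String × String)) (k : String) : String :=
  (PySem.Dict.mk t).getD k ""

def derive_overall_status (tasks : List (List (String × String))) (gate_status : String) : String :=
  if gate_status == "blocked" then "blocked"
  else if tasks.any (fun t => pvTaskGet t "final_status" == "blocked") then "blocked"
  else if tasks.any (fun t => pvTaskGet t "execution_status" == "failed") then "failed"
  else if tasks.any (fun t => pvTaskGet t "final_status" == "review_handoff") then "review_handoff"
  else if tasks.any (fun t => pvTaskGet t "final_status" == "updated") then "updated"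
  else "pending"

-- ===== PORT B =====
def derive_overall_status_alt (tasks : List (List (String × String))) (gate_status : String) : String :=
  let flags := tasks.foldl
    (fun (f : Bool × Bool × Bool × Bool) t =>
      let fs := pvTaskGet t "final_status"
      let es := pvTaskGet t "execution_status"
      (f.1 || fs == "blocked", f.2.1 || es == "failed",
       f.2.2.1 || fs == "review_handoff", f.2.2.2 || fs == "updated"))
    (false, false, false, false)
  if gate_status == "blocked" || flags.1 then "blocked"
  else if flags.2.1 then "failed"
  else if flags.2.2.1 then "review_handoff"
  else if flags.2.2.2 then "updated"
  else "pending"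

-- ===== PRECONDITION & SPEC =====
def Spec_derive_overall_status (tasks : List (List (String × String))) (gate_status : String) (out : String) : Prop := out = derive_overall_status_alt tasks gate_status
instance (tasks : List (List (String × String))) (gate_status : String) (out : String) : Decidable (Spec_derive_overall_status tasks gate_status out) := by unfold Spec_derive_overall_status; infer_instance

-- ===== CLAIM (what is proved, stated in full; the proofs are below) =====
def Claim_equal_derive_overall_status : Prop := ∀ (tasks : List (List (String × String))) (gate_status : String), Dom_derive_overall_status tasks gate_status → Spec_derive_overall_status tasks gate_status (derive_overall_status tasks gate_status)

-- ===== LEMMAS AND PROOFS =====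
theorem pvFlags_eq (tasks : List (List (String × String))) (a b c d : Bool) :
    tasks.foldl
      (fun (f : Bool × Bool × Bool × Bool) t =>
        let fs := pvTaskGet t "final_status"
        let es := pvTaskGet t "execution_status"
        (f.1 || fs == "blocked", f.2.1 || es == "failed",
         f.2.2.1 || fs == "review_handoff", f.2.2.2 || fs == "updated"))
      (a, b, c, d)
    = (a || tasks.any (fun t => pvTaskGet t "final_status" == "blocked"),
       b || tasks.any (fun t => pvTaskGet t "execution_status" == "failed"),
       c || tasks.any (fun t => pvTaskGet t "final_status" == "review_handoff"),
       d || tasks.any (fun t => pvTaskGet t "final_status" == "updated")) := by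
  induction tasks generalizing a b c d with
  | nil => simp
  | cons t ts ih => simp only [List.foldl_cons, List.any_cons, ih, Bool.or_assoc]

-- ===== VERDICT (by name: the statement is the Claim_ definition above) =====
theorem derive_overall_status_spec : Claim_equal_derive_overall_status := by
  intro tasks gate_status _
  unfold Spec_derive_overall_status derive_overall_status derive_overall_status_alt
  rw [pvFlags_eq]
  simp only [Bool.false_or]
  by_cases hg : gate_status == "blocked" <;> simp [hg]
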